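-- pv_equiv track=rewrite | github.com/facundo-p/tm-scorekeeper | backend/services/helpers/records.py | max_counter_entries
-- ===== SOURCE A (Python) =====
-- def max_counter_entries(counter):
--     """
--     Devuelve (max_value, keys) donde keys son todas las claves que
--     tienen el valor máximo.
--     """
--     if not counter:
--         return None, []
--
--     max_value = max(counter.values())
--
--     keys = [
--         key
--         for key, value in counter.items()
--         if value == max_value
--     ]
--
--     return max_value, keys
-- ===== SOURCE B (Python) =====
-- def max_counter_entries(counter):
--     """
--     Devuelve (max_value, keys) donde keys son todas las claves que
--     tienen el valor maximo. Single pass keeping running max and its keys.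
--     """
--     if not counter:
--         return None, []
--
--     max_value = None
--     keys = []
--     for key, value in counter.items():
--         if max_value is None or value > max_value:
--             max_value = value
--             keys = [key]
--         elif value == max_value:
--             keys.append(key)
--
--     return max_value, keys
-- ===== Notes on version B (the rewrite author's own statement) =====
-- stated objective: alternative
-- what changed: Replaced the two passes (max over values, then a filtering comprehension over items) by one single pass over items maintaining the running maximum and the list of keys attaining it (reset on greater, append on equal).
import Mathlib
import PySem

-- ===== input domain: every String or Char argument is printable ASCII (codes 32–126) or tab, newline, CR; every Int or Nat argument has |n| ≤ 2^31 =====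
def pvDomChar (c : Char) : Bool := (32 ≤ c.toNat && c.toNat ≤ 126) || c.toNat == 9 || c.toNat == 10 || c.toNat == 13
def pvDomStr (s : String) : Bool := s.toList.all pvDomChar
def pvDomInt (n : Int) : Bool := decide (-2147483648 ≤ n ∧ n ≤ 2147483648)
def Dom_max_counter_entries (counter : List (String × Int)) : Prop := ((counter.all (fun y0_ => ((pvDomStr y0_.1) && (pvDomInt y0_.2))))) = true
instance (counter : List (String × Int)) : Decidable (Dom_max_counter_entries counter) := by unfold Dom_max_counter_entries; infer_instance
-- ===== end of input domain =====

-- B folds A's two passes (max over values, then a filter over items) into one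
-- single pass maintaining the running maximum and the list of keys attaining it.


-- ===== PORT A =====
-- A: empty guard; max(counter.values()); then a comprehension filtering items by max.
def max_counter_entries (counter : List (String × Int)) : Option Int × List String :=
  if counter = [] then (none, [])
  else
    match PySem.List.max? (counter.map Prod.snd) (fun x => x) with
    | none => (none, [])  -- unreachable: counter ≠ []
    | some mv => (some mv, (counter.filter (fun p => p.2 = mv)).map Prod.fst)

-- ===== PORT B =====
-- B's loop: running max (Option Int, starts none) and keys list (reset on >, append on =).
def mceLoop : List (String × Int) → Option Int → List String → Option Int × List String
  | [], mv, keys => (mv, keys)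
  | (k, v) :: rest, mv, keys =>
    match mv with
    | none => mceLoop rest (some v) [k]
    | some m =>
      if v > m then mceLoop rest (some v) [k]
      else if v = m then mceLoop rest (some m) (keys ++ [k])
      else mceLoop rest (some m) keys

def max_counter_entries_alt (counter : List (String × Int)) : Option Int × List String :=
  if counter = [] then (none, [])
  else mceLoop counter none []

-- ===== PRECONDITION & SPEC =====
def Spec_max_counter_entries (counter : List (String × Int)) (out : Option Int × List String) : Prop := out = max_counter_entries_alt counter
instance (counter : List (String × Int)) (out : Option Int × List String) : Decidable (Spec_max_counter_entries counter out) := by unfold Spec_max_counter_entries; infer_instance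

-- ===== CLAIM (what is proved, stated in full; the proofs are below) =====
def Claim_equal_max_counter_entries : Prop := ∀ (counter : List (String × Int)), Dom_max_counter_entries counter → Spec_max_counter_entries counter (max_counter_entries counter)

-- ===== LEMMAS AND PROOFS =====

-- m' is a lower bound of the running max of the loop.
theorem foldl_max_le (tl : List (String × Int)) (m' : Int) :
    m' ≤ tl.foldl (fun a p => max a p.2) m' := by
  induction tl generalizing m' with
  | nil => simp
  | cons h2 t2 ih2 => exact le_trans (le_max_left _ _) (ih2 (max m' h2.2))

-- Invariant of B's loop once the running max is some m and `keys` are the keys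
-- seen so far whose value equals m.
theorem mceLoop_some (xs : List (String × Int)) (m : Int) (keys : List String) :
    mceLoop xs (some m) keys =
      (some (xs.foldl (fun a p => max a p.2) m),
       (if m = xs.foldl (fun a p => max a p.2) m then keys else [])
         ++ (xs.filter (fun p => p.2 = xs.foldl (fun a p => max a p.2) m)).map Prod.fst) := by
  induction xs generalizing m keys with
  | nil => simp [mceLoop]
  | cons hd tl ih =>
    obtain ⟨k, v⟩ := hd
    have hM := foldl_max_le tl
    by_cases hgt : v > m
    · have hmax : max m v = v := by omega
      have hMv := hM v
      simp only [mceLoop, if_pos hgt, List.foldl_cons, hmax, ih]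
      have hne : ¬ m = tl.foldl (fun a p => max a p.2) v := by omega
      rw [if_neg hne]
      generalize tl.foldl (fun a p => max a p.2) v = F at *
      by_cases hm : v = F
      · subst hm; simp [List.filter_cons]
      · simp [List.filter_cons, hm]
    · have hmax : max m v = m := by omega
      have hMm := hM m
      simp only [mceLoop, if_neg hgt, List.foldl_cons, hmax]
      by_cases heq : v = m
      · subst heq
        simp only [ih]
        generalize tl.foldl (fun a p => max a p.2) v = F at *
        by_cases hm : v = F
        · subst hm; simp [List.filter_cons]
        · simp [List.filter_cons, hm]
      · have hlt : v < m := by omega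
        simp only [if_neg heq, ih]
        have hne : ¬ v = tl.foldl (fun a p => max a p.2) m := by omega
        simp [hne]

theorem mce_eq (counter : List (String × Int)) :
    max_counter_entries counter = max_counter_entries_alt counter := by
  cases counter with
  | nil => rfl
  | cons hd tl =>
    obtain ⟨k, v⟩ := hd
    have hmax : PySem.List.max? (((k, v) :: tl).map Prod.snd) (fun x => x)
        = some (tl.foldl (fun a p => max a p.2) v) := by
      rw [List.map_cons, PySem.List.max?_id_cons]
      simp [List.foldl_map]
    have hv := foldl_max_le tl
    simp only [max_counter_entries, max_counter_entries_alt, if_neg (List.cons_ne_nil _ _),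
      hmax, mceLoop, mceLoop_some]
    generalize tl.foldl (fun a p => max a p.2) v = F at *
    by_cases hm : v = F
    · subst hm; simp [List.filter_cons]
    · simp [List.filter_cons, hm]

-- ===== VERDICT (by name: the statement is the Claim_ definition above) =====
theorem max_counter_entries_spec : Claim_equal_max_counter_entries := by
  intro counter _
  exact mce_eq counter
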